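-- pv_equiv track=rewrite | github.com/KhouloudSassiKs/python-data-processing-examples | student-count.py | organize_students
-- ===== SOURCE A (Python) =====
-- def organize_students(student_string: str):
--     entries = student_string.split('; ')
--     student_counts: dict[str, int] = {}
--
--     for entry in entries:
--         student = entry.split(', ')[0]  # get student name
--         student_counts[student] = student_counts.get(student, 0) + 1
--
--     # Sort by count (desc), then by student name (asc)
--     output = sorted(student_counts.items(), key=lambda x: (-x[1], x[0]))
--     return output
--
--
-- # Example usage
--     students = (
--         "Alice, Math, 09:00; "
--         "Bob, Science, 10:00; "
--         "Alice, History, 11:00; "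
--         "Charlie, Math, 12:00; "
--         "Bob, English, 13:00"
--     )
-- ===== SOURCE B (Python) =====
-- def organize_students(student_string: str):
--     # sort-then-group counting instead of a hash map
--     names = sorted(entry.split(', ')[0] for entry in student_string.split('; '))
--     pairs = []
--     for name in names:
--         if pairs and pairs[-1][0] == name:
--             pairs[-1] = (name, pairs[-1][1] + 1)
--         else:
--             pairs.append((name, 1))
--     return sorted(pairs, key=lambda p: (-p[1], p[0]))
-- ===== Notes on version B (the rewrite author's own statement) =====
-- stated objective: alternative
-- what changed: Counting by dict/hash-map accumulation is replaced by sorting the extracted names and counting runs of equal names in one grouped pass; the final (-count, name) sort is shared.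
import Mathlib
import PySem

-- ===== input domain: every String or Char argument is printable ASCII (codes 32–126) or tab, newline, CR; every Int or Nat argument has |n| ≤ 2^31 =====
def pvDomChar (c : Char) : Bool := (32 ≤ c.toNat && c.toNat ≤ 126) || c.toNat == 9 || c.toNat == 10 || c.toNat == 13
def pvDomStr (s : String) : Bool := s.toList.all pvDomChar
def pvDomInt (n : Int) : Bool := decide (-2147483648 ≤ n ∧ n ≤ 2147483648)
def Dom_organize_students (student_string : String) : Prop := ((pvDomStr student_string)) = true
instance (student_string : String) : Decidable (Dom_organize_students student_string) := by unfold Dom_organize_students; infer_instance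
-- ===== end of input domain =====

-- B replaces the dict/hash-map counting by sorting the extracted names and counting runs of
-- equal names in one grouped pass (the final (-count, name) sort is shared); alternative
-- decomposition, same asymptotic cost.

-- ===== PORT A =====
-- entry.split(', ')[0]: the separator is nonempty so split? is `some`, and Python's split
-- always returns at least one piece, so `.getD []` / `.headD ""` are exact here.
def pvFirstField (entry : String) : String :=
  ((PySem.Str.split? entry ", ").getD []).headD ""

def organize_students (student_string : String) : List (String × Int) :=
  let entries := (PySem.Str.split? student_string "; ").getD []
  let student_counts : PySem.Dict String Int :=
    entries.foldl (fun d entry =>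
      let student := pvFirstField entry
      d.insert student (d.getD student 0 + 1)) PySem.Dict.empty
  PySem.List.sorted2 student_counts.items (fun x => -x.2) (fun x => x.1)

-- ===== PORT B =====
-- one step of the grouping loop: `if pairs and pairs[-1][0] == name: pairs[-1] = …  else: pairs.append(…)`
def pvGroupStep (pairs : List (String × Int)) (name : String) : List (String × Int) :=
  match pairs.getLast? with
  | some p => if p.1 == name then pairs.dropLast ++ [(name, p.2 + 1)] else pairs ++ [(name, 1)]
  | none => pairs ++ [(name, 1)]

def organize_students_alt (student_string : String) : List (String × Int) :=
  let names := PySem.List.sorted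
    (((PySem.Str.split? student_string "; ").getD []).map pvFirstField) (fun x => x)
  let pairs := names.foldl pvGroupStep []
  PySem.List.sorted2 pairs (fun p => -p.2) (fun p => p.1)

-- ===== PRECONDITION & SPEC =====
def Spec_organize_students (student_string : String) (out : List (String × Int)) : Prop := out = organize_students_alt student_string
instance (student_string : String) (out : List (String × Int)) : Decidable (Spec_organize_students student_string out) := by unfold Spec_organize_students; infer_instance

-- ===== CLAIM (what is proved, stated in full; the proofs are below) =====
def Claim_equal_organize_students : Prop := ∀ (student_string : String), Dom_organize_students student_string → Spec_organize_students student_string (organize_students student_string)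

-- ===== LEMMAS AND PROOFS =====

-- sorted2 with keys (k1, k2) is sorted with the lexicographic key
theorem pv_sorted2_eq_sorted_lex {α : Type} (xs : List α) (k1 : α → Int) (k2 : α → String) :
    PySem.List.sorted2 xs k1 k2 = PySem.List.sorted xs (fun x => toLex (k1 x, k2 x)) := by
  rw [PySem.List.sorted_eq_foldl_insertBy]
  unfold PySem.List.sorted2
  show List.foldl (fun acc x => PySem.List.insertBy
      (fun a b => decide (k1 a < k1 b) || (!decide (k1 b < k1 a) && decide (k2 a < k2 b))) x acc) [] xs = _
  congr 1
  funext acc x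
  congr 1
  funext a b
  rw [Bool.eq_iff_iff]
  simp only [Bool.or_eq_true, Bool.and_eq_true, Bool.not_eq_true', decide_eq_true_eq,
    decide_eq_false_iff_not, Prod.Lex.toLex_lt_toLex]
  constructor
  · rintro (h | ⟨h1, h2⟩)
    · exact Or.inl h
    · rcases lt_trichotomy (k1 a) (k1 b) with h' | h' | h'
      · exact Or.inl h'
      · exact Or.inr ⟨h', h2⟩
      · exact absurd h' h1
  · rintro (h | ⟨h1, h2⟩)
    · exact Or.inl h
    · exact Or.inr ⟨by simp [h1], h2⟩

theorem pv_lexkey_injective : Function.Injective (fun p : String × Int => toLex (-p.2, p.1)) := by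
  rintro ⟨a, b⟩ ⟨c, d⟩ h
  simp only [toLex_inj, Prod.mk.injEq, neg_inj] at h
  simp [h.1, h.2]

theorem pv_ofList_sublist {α : Type} [BEq α] [LawfulBEq α] (xs : List α) :
    (PySem.Set.ofList xs).Sublist xs := by
  induction xs with
  | nil => simp [PySem.Set.ofList_nil]
  | cons x t ih =>
    rw [PySem.Set.ofList_cons]
    refine List.Sublist.cons₂ x ?_
    unfold PySem.Set.discard
    exact List.filter_sublist.trans ih

-- in a strictly increasing list, a member that bounds every element is the last element
theorem pv_last_of_max (l : List String) (a : String) (hl : l.Pairwise (· < ·))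
    (ha : a ∈ l) (hmax : ∀ x ∈ l, x ≤ a) : l.getLast? = some a := by
  induction l with
  | nil => cases ha
  | cons x t ih =>
    cases t with
    | nil => simp at ha ⊢; simpa using ha.symm
    | cons y t' =>
      rw [List.getLast?_cons_cons]
      have hxy : x < y := (List.pairwise_cons.mp hl).1 y (by simp)
      have ha' : a ∈ y :: t' := by
        rcases List.mem_cons.mp ha with rfl | h
        · exact absurd (lt_of_lt_of_le hxy (hmax y (by simp))) (lt_irrefl a)
        · exact h
      exact ih (List.pairwise_cons.mp hl).2 ha' (fun z hz => hmax z (List.mem_cons_of_mem x hz))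

-- the grouped pass over a sorted list produces each distinct name with its count
theorem pv_group (ns : List String) (h : ns.Pairwise (· ≤ ·)) :
    ns.foldl pvGroupStep [] = (PySem.Set.ofList ns).map (fun k => (k, (ns.count k : Int))) := by
  induction ns using List.reverseRecOn with
  | nil => simp [PySem.Set.ofList_nil]
  | append_singleton ms a ih =>
    rw [List.pairwise_append] at h
    obtain ⟨hms, -, hmax⟩ := h
    have hmax' : ∀ x ∈ ms, x ≤ a := fun x hx => hmax x hx a (by simp)
    rw [List.foldl_append, List.foldl_cons, List.foldl_nil, ih hms,
        PySem.Set.ofList_append_singleton]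
    have hnd : (PySem.Set.ofList ms).Nodup := PySem.Set.nodup_ofList ms
    by_cases hmem : a ∈ ms
    · -- a already counted: the grouped pass bumps the last pair, the set is unchanged
      have hadd : (PySem.Set.ofList ms).add a = PySem.Set.ofList ms := by
        unfold PySem.Set.add
        rw [if_pos ((PySem.Set.contains_iff _ _).mpr ((PySem.Set.mem_ofList ms a).mpr hmem))]
      have hlt : (PySem.Set.ofList ms).Pairwise (· < ·) := by
        refine ((hms.sublist (pv_ofList_sublist ms)).and hnd).imp ?_
        exact fun ⟨h1, h2⟩ => lt_of_le_of_ne h1 h2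
      have hlast : (PySem.Set.ofList ms).getLast? = some a :=
        pv_last_of_max _ a hlt ((PySem.Set.mem_ofList ms a).mpr hmem)
          (fun x hx => hmax' x ((PySem.Set.mem_ofList ms x).mp hx))
      have hne : PySem.Set.ofList ms ≠ [] := by
        intro hnil; rw [hnil] at hlast; cases hlast
      have hsplit : (PySem.Set.ofList ms).dropLast ++ [a] = PySem.Set.ofList ms := by
        have h1 := List.dropLast_append_getLast hne
        have h2 : (PySem.Set.ofList ms).getLast hne = a := by
          have := List.getLast?_eq_some_getLast (l := PySem.Set.ofList ms) hne
          rw [this] at hlast; exact Option.some.inj hlast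
        rw [h2] at h1; exact h1
      have hanotin : a ∉ (PySem.Set.ofList ms).dropLast := by
        rw [← hsplit] at hnd
        intro hin
        exact (List.nodup_append.mp hnd).2.2 a hin a (by simp) rfl
      rw [hadd]
      unfold pvGroupStep
      rw [List.getLast?_map, hlast]
      simp only [Option.map_some, BEq.rfl, if_pos]
      conv_rhs => rw [← hsplit]
      rw [List.map_append, ← List.map_dropLast]
      congr 1
      · refine List.map_congr_left (fun k hk => ?_)
        have hka : k ≠ a := fun hkeq => hanotin (hkeq ▸ hk)
        simp [List.count_append, Ne.symm hka]
      · simp [List.count_append, List.count_singleton]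
    · -- a is new: the grouped pass appends (a, 1), the set appends a
      have hadd : (PySem.Set.ofList ms).add a = PySem.Set.ofList ms ++ [a] := by
        unfold PySem.Set.add
        rw [if_neg]
        intro hc
        exact hmem ((PySem.Set.mem_ofList ms a).mp ((PySem.Set.contains_iff _ _).mp hc))
      have hcnt0 : ms.count a = 0 := List.count_eq_zero.mpr hmem
      have hstep : pvGroupStep ((PySem.Set.ofList ms).map (fun k => (k, (ms.count k : Int)))) a
          = (PySem.Set.ofList ms).map (fun k => (k, (ms.count k : Int))) ++ [(a, 1)] := by
        unfold pvGroupStep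
        rw [List.getLast?_map]
        rcases hl : (PySem.Set.ofList ms).getLast? with _ | k
        · simp [List.getLast?_eq_none_iff.mp hl]
        · have hka : k ≠ a := fun hkeq =>
            hmem (hkeq ▸ (PySem.Set.mem_ofList ms k).mp (List.mem_of_getLast? hl))
          simp [hka]
      rw [hstep, hadd, List.map_append]
      congr 1
      · refine List.map_congr_left (fun k hk => ?_)
        have hka : k ≠ a := fun hkeq => hmem (hkeq ▸ (PySem.Set.mem_ofList ms k).mp hk)
        simp [List.count_append, Ne.symm hka]
      · simp [List.count_append, List.count_singleton, hcnt0]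

-- core equality of the two pipelines, for any list of entries
theorem pv_core (entries : List String) :
    PySem.List.sorted2
      ((entries.foldl (fun d entry =>
        let student := pvFirstField entry
        d.insert student (d.getD student 0 + 1)) (PySem.Dict.empty : PySem.Dict String Int)).items)
      (fun x => -x.2) (fun x => x.1)
    = PySem.List.sorted2
      ((PySem.List.sorted (entries.map pvFirstField) (fun x => x)).foldl pvGroupStep [])
      (fun p => -p.2) (fun p => p.1) := by
  have hA : entries.foldl (fun d entry =>
      let student := pvFirstField entry
      d.insert student (d.getD student 0 + 1)) (PySem.Dict.empty : PySem.Dict String Int)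
      = PySem.Dict.counter (entries.map pvFirstField) := by
    rw [← PySem.Dict.foldl_insert_getD_add_one_eq_counter, List.foldl_map]
  set names := entries.map pvFirstField with hn
  set snames := PySem.List.sorted names (fun x => x) with hs
  have hsperm : snames.Perm names := PySem.List.sorted_perm names (fun x => x) false
  have hB : snames.foldl pvGroupStep []
      = (PySem.Set.ofList snames).map (fun k => (k, (names.count k : Int))) := by
    rw [pv_group snames (by simpa using PySem.List.sorted_pairwise names (fun x => x))]
    exact List.map_congr_left (fun k _ => by rw [hsperm.count_eq k])
  have hperm : ((PySem.Set.ofList snames).map (fun k => (k, (names.count k : Int)))).Perm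
      ((PySem.Set.ofList names).map (fun k => (k, (names.count k : Int)))) := by
    refine List.Perm.map _ ?_
    refine (List.perm_ext_iff_of_nodup (PySem.Set.nodup_ofList _) (PySem.Set.nodup_ofList _)).mpr ?_
    intro k
    rw [PySem.Set.mem_ofList, PySem.Set.mem_ofList, hsperm.mem_iff]
  rw [hA, PySem.Dict.items_counter, pv_sorted2_eq_sorted_lex, pv_sorted2_eq_sorted_lex, hB]
  exact PySem.List.sorted_eq_sorted_of_perm _ _ _ pv_lexkey_injective hperm.symm

-- ===== VERDICT (by name: the statement is the Claim_ definition above) =====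
theorem organize_students_spec : Claim_equal_organize_students := by
  intro student_string _
  exact pv_core ((PySem.Str.split? student_string "; ").getD [])
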